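-- pv_equiv track=rewrite | github.com/Fr4ntastic/jones-twisted-torus | verify_structural_lemma.py | compute_k_ell
-- ===== SOURCE A (Python) =====
-- def compute_k_ell(q):
--     """Compute k and ell from Lemmas 4.3 and Corollary 3.5 of Bavier-Doleshal."""
--     p = 3
--     q_hat = q % p
--     q_hat_inv = None
--     for inv in range(1, p):
--         if (q_hat * inv) % p == 1:
--             q_hat_inv = inv
--             break
--     k = min(q_hat_inv, p - q_hat_inv)
--     for i_val in [0, 1, 2]:
--         val = q * k - i_val + 1
--         if val % p == 0 and val // p >= 0:
--             return k, val // p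
--     raise ValueError(f"Could not compute ell for q={q}")
-- ===== SOURCE B (Python) =====
-- def compute_k_ell(q):
--     """Compute k and ell from Lemmas 4.3 and Corollary 3.5 of Bavier-Doleshal."""
--     if q % 3 == 0:
--         raise ValueError(f"q={q} is not invertible mod 3")
--     # For q % 3 in {1, 2} the mod-3 inverse is 1 or 2, so min(inv, 3 - inv) = 1:
--     # k is identically 1, and the unique ell with 3*ell = q*k - i + 1 (i in 0..2,
--     # ell >= 0) is the floor division (q + 1) // 3, nonnegative iff q >= -1.
--     ell = (q + 1) // 3
--     if ell < 0:
--         raise ValueError(f"Could not compute ell for q={q}")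
--     return 1, ell
-- ===== Notes on version B (the rewrite author's own statement) =====
-- stated objective: simpler
-- what changed: Both of A's loops are eliminated: since min(inv, 3-inv) = 1 for inv in {1,2}, k is identically 1 whenever q is invertible mod 3, and ell is the closed form (q+1)//3; B is two arithmetic lines with no search.
import Mathlib
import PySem

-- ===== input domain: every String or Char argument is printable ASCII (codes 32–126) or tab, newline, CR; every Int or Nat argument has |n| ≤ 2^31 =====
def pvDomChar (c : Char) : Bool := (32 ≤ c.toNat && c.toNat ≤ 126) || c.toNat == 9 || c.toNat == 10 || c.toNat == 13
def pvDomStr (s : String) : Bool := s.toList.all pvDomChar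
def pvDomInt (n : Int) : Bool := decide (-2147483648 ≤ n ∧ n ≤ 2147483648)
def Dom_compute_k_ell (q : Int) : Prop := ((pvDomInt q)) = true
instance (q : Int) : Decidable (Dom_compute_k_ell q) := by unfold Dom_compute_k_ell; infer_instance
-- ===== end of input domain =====

-- B drops both of A's search loops: inside A's returning domain k = 1 identically and
-- ell = (q+1)//3 in closed form (objective: simpler).

-- ===== PORT A =====
-- the 'for inv in range(1, p): if …: q_hat_inv = inv; break' loop
def compute_k_ell (q : Int) : Int × Int :=
  let p : Int := 3
  let q_hat := PySem.Int.mod q p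
  let q_hat_inv : Option Int :=
    (PySem.List.pyRange 1 p 1).findSome? (fun inv =>
      if PySem.Int.mod (q_hat * inv) p = 1 then some inv else none)
  match q_hat_inv with
  | none => (0, 0)   -- Python: min(None, …) raises TypeError; outside Pre_
  | some inv =>
    let k := min inv (p - inv)
    -- 'for i_val in [0, 1, 2]: …' with early return
    match ([0, 1, 2] : List Int).findSome? (fun i_val =>
        let val := q * k - i_val + 1
        if PySem.Int.mod val p = 0 ∧ PySem.Int.floordiv val p ≥ 0
        then some (k, PySem.Int.floordiv val p) else none) with
    | some out => out
    | none => (0, 0)   -- Python: raise ValueError; outside Pre_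

-- ===== PORT B =====
def compute_k_ell_alt (q : Int) : Int × Int :=
  if PySem.Int.mod q 3 = 0 then (0, 0)   -- Python: raise ValueError; outside Pre_
  else
    let ell := PySem.Int.floordiv (q + 1) 3
    if ell < 0 then (0, 0)               -- Python: raise ValueError; outside Pre_
    else (1, ell)

-- ===== PRECONDITION & SPEC =====
-- A raises TypeError when q % 3 == 0 (no inverse found, min(None, …)) and ValueError when q ≤ -2
-- (ell would be negative); Pre_ excludes exactly those inputs.
def Pre_compute_k_ell (q : Int) : Prop := q % 3 ≠ 0 ∧ -1 ≤ q
instance (q : Int) : Decidable (Pre_compute_k_ell q) := by unfold Pre_compute_k_ell; infer_instance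
def pvWitness_compute_k_ell : Int := 7

def Spec_compute_k_ell (q : Int) (out : Int × Int) : Prop := out = compute_k_ell_alt q
instance (q : Int) (out : Int × Int) : Decidable (Spec_compute_k_ell q out) := by unfold Spec_compute_k_ell; infer_instance

-- ===== CLAIM (what is proved, stated in full; the proofs are below) =====
def Claim_equal_compute_k_ell : Prop := ∀ (q : Int), Dom_compute_k_ell q → Pre_compute_k_ell q → Spec_compute_k_ell q (compute_k_ell q)

-- ===== LEMMAS AND PROOFS =====

theorem pymod3 (q : Int) : PySem.Int.mod q 3 = q % 3 :=
  PySem.Int.mod_eq_emod_of_pos (by norm_num)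

theorem pydiv3 (a : Int) : PySem.Int.floordiv a 3 = a / 3 :=
  PySem.Int.floordiv_eq_ediv_of_pos (by norm_num)

-- q % 3 = 1 case
theorem case1 (q : Int) (h : q % 3 = 1) (hq : -1 ≤ q) :
    compute_k_ell q = compute_k_ell_alt q := by
  obtain ⟨m, hm⟩ : ∃ m, q = 3 * m + 1 := ⟨q / 3, by omega⟩
  subst hm
  have hm0 : 0 ≤ m := by omega
  simp only [compute_k_ell, compute_k_ell_alt]
  norm_num [PySem.List.pyRange, pymod3, pydiv3,
            show List.range (Int.toNat 2) = [0, 1] from by decide, List.findSome?]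
  split_ifs <;> first | rfl | omega | exact Prod.ext (by simp) (by simp; omega)

-- q % 3 = 2 case
theorem case2 (q : Int) (h : q % 3 = 2) (hq : -1 ≤ q) :
    compute_k_ell q = compute_k_ell_alt q := by
  obtain ⟨m, hm⟩ : ∃ m, q = 3 * m + 2 := ⟨q / 3, by omega⟩
  subst hm
  have hm0 : -1 ≤ m := by omega
  simp only [compute_k_ell, compute_k_ell_alt]
  norm_num [PySem.List.pyRange, pymod3, pydiv3,
            show List.range (Int.toNat 2) = [0, 1] from by decide, List.findSome?]
  split_ifs <;> first | rfl | omega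

-- ===== VERDICT (by name: the statement is the Claim_ definition above) =====
theorem compute_k_ell_spec : Claim_equal_compute_k_ell := by
  intro q _ ⟨h3, hq⟩
  have hb := Int.emod_nonneg q (show (3:Int) ≠ 0 by norm_num)
  have hlt := Int.emod_lt_of_pos q (show (0:Int) < 3 by norm_num)
  unfold Spec_compute_k_ell
  rcases (show q % 3 = 1 ∨ q % 3 = 2 by omega) with h | h
  · exact (case1 q h hq).symm ▸ rfl
  · exact (case2 q h hq).symm ▸ rfl
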